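-- pv_equiv track=rewrite | github.com/pythongus/algorithms | test/test_fun_with_anagrams.py | funWithAnagrams
-- ===== SOURCE A (Python) =====
-- def funWithAnagrams(s):
--     if not 1 <= len(s) <= 1000:
--         return s
--     ss = {}
--     for w in sorted(s):
--         srt = "".join(sorted(w))
--         if not srt in ss:
--             ss[srt] = w
--     return sorted(ss.values())
-- ===== SOURCE B (Python) =====
-- def funWithAnagrams(s):
--     if not 1 <= len(s) <= 1000:
--         return s
--     def key(w):
--         return "".join(sorted(w))
--     winners = {w for w in s if all(w <= x for x in s if key(x) == key(w))}
--     return sorted(winners)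
-- ===== Notes on version B (the rewrite author's own statement) =====
-- stated objective: alternative
-- what changed: B drops A's pre-sort and incremental dict entirely: it keeps exactly the words that are lexicographic minima of their anagram class, found by a direct all-pairs comparison collected into a set, then sorts the set.
import Mathlib
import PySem

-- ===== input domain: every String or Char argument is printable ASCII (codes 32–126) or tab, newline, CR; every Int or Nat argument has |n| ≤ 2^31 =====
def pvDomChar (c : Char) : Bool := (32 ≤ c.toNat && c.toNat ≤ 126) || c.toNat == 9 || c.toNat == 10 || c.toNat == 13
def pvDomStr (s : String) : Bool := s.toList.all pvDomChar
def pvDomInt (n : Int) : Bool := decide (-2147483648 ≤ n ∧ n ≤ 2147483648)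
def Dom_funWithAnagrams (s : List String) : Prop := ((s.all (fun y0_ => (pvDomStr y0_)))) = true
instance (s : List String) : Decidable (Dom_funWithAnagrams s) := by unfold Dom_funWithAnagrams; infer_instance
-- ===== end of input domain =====

-- B replaces A's "sort the whole input, then first word seen per anagram key wins in a dict" with a
-- direct characterisation: keep the words that are lexicographic minima of their anagram class
-- (an all-pairs filter collected into a set), then sort (alternative algorithm, no dict, no pre-sort).


-- ===== PORT A =====
-- srt = "".join(sorted(w)) : exact — joining the sorted one-char strings of w is the string of
-- w's sorted characters; both Pythons compute this key.
def pvKey (w : String) : String := String.ofList (PySem.List.sorted w.toList (fun c => c) false)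

-- one step of A's loop body: first word seen for a key wins
def pvStepA (d : PySem.Dict String String) (w : String) : PySem.Dict String String :=
  let srt := pvKey w
  if d.contains srt then d else d.insert srt w

def funWithAnagrams (s : List String) : List String :=
  if ¬ (1 ≤ s.length ∧ s.length ≤ 1000) then s
  else
    let ss := (PySem.List.sorted s (fun x => x) false).foldl pvStepA PySem.Dict.empty
    PySem.List.sorted ss.values (fun x => x) false

-- ===== PORT B =====
-- w is kept iff all(w <= x for x in s if key(x) == key(w)); the set comprehension is PySem.Set.ofList
-- of the filtered list (iteration order is irrelevant: the set is immediately sorted).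
def pvIsMin (s : List String) (w : String) : Bool :=
  s.all (fun x => pvKey x != pvKey w || decide (w ≤ x))

def funWithAnagrams_alt (s : List String) : List String :=
  if ¬ (1 ≤ s.length ∧ s.length ≤ 1000) then s
  else
    let winners := PySem.Set.ofList (s.filter (fun w => pvIsMin s w))
    PySem.List.sorted winners (fun x => x) false

-- ===== PRECONDITION & SPEC =====
def Spec_funWithAnagrams (s : List String) (out : List String) : Prop := out = funWithAnagrams_alt s
instance (s : List String) (out : List String) : Decidable (Spec_funWithAnagrams s out) := by unfold Spec_funWithAnagrams; infer_instance

-- ===== CLAIM (what is proved, stated in full; the proofs are below) =====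
def Claim_equal_funWithAnagrams : Prop := ∀ (s : List String), Dom_funWithAnagrams s → Spec_funWithAnagrams s (funWithAnagrams s)

-- ===== LEMMAS AND PROOFS =====

theorem pvA_get? (m : List String) (d : PySem.Dict String String) (k : String) :
    (m.foldl pvStepA d).get? k = (d.get? k).or (m.find? (fun w => pvKey w == k)) := by
  induction m generalizing d with
  | nil => simp
  | cons w m ih =>
    simp only [List.foldl_cons, List.find?_cons, ih]
    by_cases hc : (d.contains (pvKey w)) = true
    · simp only [pvStepA, hc, if_true]
      by_cases hk : pvKey w = k
      · subst hk
        have : (d.get? (pvKey w)).isSome := by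
          rw [← PySem.Dict.contains_eq_isSome_get?]; exact hc
        obtain ⟨v, hv⟩ := Option.isSome_iff_exists.mp this
        simp [hv]
      · have hb : (pvKey w == k) = false := by simp [hk]
        simp [hb]
    · simp only [pvStepA, Bool.not_eq_true] at hc ⊢
      simp only [hc]
      by_cases hk : pvKey w = k
      · subst hk
        have h0 : d.get? (pvKey w) = none := by
          cases h : d.get? (pvKey w) with
          | none => rfl
          | some v => rw [PySem.Dict.contains_eq_isSome_get?, h] at hc; simp at hc
        simp [h0]
      · have hb : (pvKey w == k) = false := by simp [hk]
        simp [PySem.Dict.get?_insert, Ne.symm hk, hb]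

theorem pvA_nodup (m : List String) (d : PySem.Dict String String) (h : d.keys.Nodup) :
    (m.foldl pvStepA d).keys.Nodup := by
  induction m generalizing d with
  | nil => exact h
  | cons w m ih =>
    refine ih _ ?_
    by_cases hc : (d.contains (pvKey w)) = true
    · simpa [pvStepA, hc] using h
    · simp only [Bool.not_eq_true] at hc
      simpa [pvStepA, hc] using PySem.Dict.nodup_keys_insert d (pvKey w) w h

theorem pvA_keys (m : List String) (d : PySem.Dict String String) :
    (m.foldl pvStepA d).keys = PySem.Set.update d.keys (m.map pvKey) := by
  induction m generalizing d with
  | nil => simp [PySem.Set.update]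
  | cons w m ih =>
    simp only [List.foldl_cons, List.map_cons, ih]
    have : PySem.Set.update d.keys (pvKey w :: m.map pvKey)
        = PySem.Set.update (PySem.Set.add d.keys (pvKey w)) (m.map pvKey) := by
      simp [PySem.Set.update]
    rw [this]
    congr 1
    by_cases hc : (d.contains (pvKey w)) = true
    · have hm : pvKey w ∈ d.keys := (PySem.Dict.contains_iff_mem_keys d (pvKey w)).mp hc
      simp [pvStepA, hc, PySem.Set.add, PySem.Set.contains, hm]
    · simp only [Bool.not_eq_true] at hc
      have hm : pvKey w ∉ d.keys := by
        intro hmem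
        rw [(PySem.Dict.contains_iff_mem_keys d (pvKey w)).mpr hmem] at hc; simp at hc
      simp only [pvStepA, hc, Bool.false_eq_true, if_false,
        PySem.Dict.keys_insert_of_not_contains (h := hc),
        PySem.Set.add, PySem.Set.contains]
      simp [hm]

theorem pvFind_min (l : List String) (p : String → Bool) (v : String)
    (hp : l.Pairwise (· ≤ ·)) (hf : l.find? p = some v) :
    ∀ x ∈ l, p x = true → v ≤ x := by
  induction l with
  | nil => simp at hf
  | cons h t ih =>
    rw [List.pairwise_cons] at hp
    intro x hx hpx
    by_cases hph : p h = true
    · rw [List.find?_cons_of_pos (h := hph)] at hf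
      cases hf
      rcases List.mem_cons.mp hx with rfl | hx
      · exact le_refl _
      · exact hp.1 x hx
    · rw [List.find?_cons_of_neg (h := hph)] at hf
      rcases List.mem_cons.mp hx with rfl | hx
      · exact absurd hpx hph
      · exact ih hp.2 hf x hx hpx

-- A's dict entry at key k (k a key of some word of s) is exactly the lexicographic minimum
-- of the anagram class of k in s.
theorem pvA_find_char (s : List String) (k : String) (v : String)
    (hf : (PySem.List.sorted s (fun x => x) false).find? (fun w => pvKey w == k) = some v) :
    pvKey v = k ∧ v ∈ s ∧ ∀ x ∈ s, pvKey x = pvKey v → v ≤ x := by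
  have hvp := List.find?_some (p := fun w => pvKey w == k) hf
  have hvk : pvKey v = k := by simpa using hvp
  have hvmem : v ∈ s :=
    (PySem.List.mem_sorted s (fun x => x) false v).mp (List.mem_of_find?_eq_some hf)
  refine ⟨hvk, hvmem, fun x hx hkx => ?_⟩
  have hmin := pvFind_min _ _ v (PySem.List.sorted_pairwise s (fun x => x)) hf
  exact hmin x ((PySem.List.mem_sorted s (fun x => x) false x).mpr hx) (by simp [hkx, hvk])

-- membership characterisation of A's dict values: exactly the per-class minima of s.
theorem pvA_values_char (s : List String) (v : String) :
    v ∈ ((PySem.List.sorted s (fun x => x) false).foldl pvStepA PySem.Dict.empty).values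
      ↔ (v ∈ s ∧ ∀ x ∈ s, pvKey x = pvKey v → v ≤ x) := by
  set dA := (PySem.List.sorted s (fun x => x) false).foldl pvStepA PySem.Dict.empty with hdA
  have hnodup : dA.keys.Nodup := pvA_nodup _ _ (by simp [PySem.Dict.empty, PySem.Dict.keys])
  have hget : ∀ k, dA.get? k = (PySem.List.sorted s (fun x => x) false).find? (fun w => pvKey w == k) := by
    intro k; rw [hdA, pvA_get?]; simp
  have hmemk : ∀ k, k ∈ dA.keys ↔ k ∈ s.map pvKey := by
    intro k
    rw [hdA, pvA_keys]
    have : PySem.Set.update (PySem.Dict.empty (κ := String) (ν := String)).keys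
        ((PySem.List.sorted s (fun x => x) false).map pvKey)
        = PySem.Set.ofList ((PySem.List.sorted s (fun x => x) false).map pvKey) := by
      rw [PySem.Set.ofList_eq_foldl]; rfl
    rw [this, PySem.Set.mem_ofList]
    constructor
    · intro h
      obtain ⟨w, hw, rfl⟩ := List.mem_map.mp h
      exact List.mem_map.mpr ⟨w, (PySem.List.mem_sorted s (fun x => x) false w).mp hw, rfl⟩
    · intro h
      obtain ⟨w, hw, rfl⟩ := List.mem_map.mp h
      exact List.mem_map.mpr ⟨w, (PySem.List.mem_sorted s (fun x => x) false w).mpr hw, rfl⟩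
  rw [PySem.Dict.values_eq_map_keys dA hnodup ""]
  constructor
  · intro hv
    obtain ⟨k, hk, hkv⟩ := List.mem_map.mp hv
    have hks : k ∈ s.map pvKey := (hmemk k).mp hk
    obtain ⟨w0, hw0, hw0k⟩ := List.mem_map.mp hks
    have hsome : ((PySem.List.sorted s (fun x => x) false).find? (fun w => pvKey w == k)).isSome := by
      rw [List.find?_isSome]
      exact ⟨w0, (PySem.List.mem_sorted s (fun x => x) false w0).mpr hw0, by simp [hw0k]⟩
    obtain ⟨u, hu⟩ := Option.isSome_iff_exists.mp hsome
    have hu' := pvA_find_char s k u hu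
    have : dA.getD k "" = u := by
      rw [PySem.Dict.getD_eq_get?_getD, hget, hu]; rfl
    rw [hkv] at this
    exact this ▸ ⟨hu'.2.1, hu'.2.2⟩
  · rintro ⟨hvs, hvmin⟩
    refine List.mem_map.mpr ⟨pvKey v, ?_, ?_⟩
    · exact (hmemk _).mpr (List.mem_map.mpr ⟨v, hvs, rfl⟩)
    · have hsome : ((PySem.List.sorted s (fun x => x) false).find? (fun w => pvKey w == pvKey v)).isSome := by
        rw [List.find?_isSome]
        exact ⟨v, (PySem.List.mem_sorted s (fun x => x) false v).mpr hvs, by simp⟩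
      obtain ⟨u, hu⟩ := Option.isSome_iff_exists.mp hsome
      obtain ⟨huk, hus, humin⟩ := pvA_find_char s (pvKey v) u hu
      have huv : u = v := le_antisymm (humin v hvs huk.symm) (hvmin u hus huk)
      rw [PySem.Dict.getD_eq_get?_getD, hget, hu, huv]
      rfl

-- A's values list has no duplicates: each value determines its key.
theorem pvA_values_nodup (s : List String) :
    ((PySem.List.sorted s (fun x => x) false).foldl pvStepA PySem.Dict.empty).values.Nodup := by
  set dA := (PySem.List.sorted s (fun x => x) false).foldl pvStepA PySem.Dict.empty with hdA
  have hnodup : dA.keys.Nodup := pvA_nodup _ _ (by simp [PySem.Dict.empty, PySem.Dict.keys])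
  have hget : ∀ k, dA.get? k = (PySem.List.sorted s (fun x => x) false).find? (fun w => pvKey w == k) := by
    intro k; rw [hdA, pvA_get?]; simp
  rw [PySem.Dict.values_eq_map_keys dA hnodup ""]
  refine List.Nodup.map_on ?_ hnodup
  intro k1 hk1 k2 hk2 heq
  have key_of : ∀ k ∈ dA.keys, pvKey (dA.getD k "") = k := by
    intro k hk
    have : (dA.get? k).isSome := by
      rw [← PySem.Dict.contains_eq_isSome_get?]
      exact (PySem.Dict.contains_iff_mem_keys dA k).mpr hk
    obtain ⟨u, hu⟩ := Option.isSome_iff_exists.mp this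
    have : (PySem.List.sorted s (fun x => x) false).find? (fun w => pvKey w == k) = some u := by
      rw [← hget]; exact hu
    have h1 := (pvA_find_char s k u this).1
    rw [PySem.Dict.getD_eq_get?_getD, hu]
    exact h1
  calc k1 = pvKey (dA.getD k1 "") := (key_of k1 hk1).symm
    _ = pvKey (dA.getD k2 "") := by rw [heq]
    _ = k2 := key_of k2 hk2

-- membership characterisation of B's set: also exactly the per-class minima of s.
theorem pvB_set_char (s : List String) (v : String) :
    v ∈ PySem.Set.ofList (s.filter (fun w => pvIsMin s w))
      ↔ (v ∈ s ∧ ∀ x ∈ s, pvKey x = pvKey v → v ≤ x) := by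
  rw [PySem.Set.mem_ofList, List.mem_filter]
  constructor
  · rintro ⟨hvs, hmin⟩
    refine ⟨hvs, fun x hx hk => ?_⟩
    have := List.all_eq_true.mp hmin x hx
    rcases Bool.or_eq_true_iff.mp this with h | h
    · exact absurd hk (by simpa using h)
    · exact of_decide_eq_true h
  · rintro ⟨hvs, hmin⟩
    refine ⟨hvs, List.all_eq_true.mpr fun x hx => ?_⟩
    by_cases hk : pvKey x = pvKey v
    · exact Bool.or_eq_true_iff.mpr (Or.inr (decide_eq_true (hmin x hx hk)))
    · exact Bool.or_eq_true_iff.mpr (Or.inl (by simpa using hk))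

theorem main_eq (s : List String) : funWithAnagrams s = funWithAnagrams_alt s := by
  unfold funWithAnagrams funWithAnagrams_alt
  by_cases hg : ¬ (1 ≤ s.length ∧ s.length ≤ 1000)
  · simp [hg]
  · simp only [hg, if_false]
    apply PySem.List.sorted_eq_sorted_of_perm _ _ _ (fun a b h => h)
    apply (List.perm_ext_iff_of_nodup (pvA_values_nodup s) (PySem.Set.nodup_ofList _)).mpr
    intro v
    rw [pvA_values_char, pvB_set_char]

-- ===== VERDICT (by name: the statement is the Claim_ definition above) =====
theorem funWithAnagrams_spec : Claim_equal_funWithAnagrams := by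
  intro s _
  unfold Spec_funWithAnagrams
  exact main_eq s
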